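-- pv_equiv track=rewrite | github.com/alexroessner/NewsFeed | src/newsfeed/intelligence/narrative.py | _region_phrase
-- ===== SOURCE A (Python) =====
-- def _region_phrase(regions: list[str]) -> str:
--     """Format regions for inline text."""
--     if not regions:
--         return ""
--     display = [r.replace("_", " ").title() for r in regions[:3]]
--     if len(display) == 1:
--         return display[0]
--     if len(display) == 2:
--         return f"{display[0]} and {display[1]}"
--     return f"{display[0]}, {display[1]}, and {display[2]}"
-- ===== SOURCE B (Python) =====
-- def _region_phrase(regions: list[str]) -> str:
--     """Format regions for inline text."""
--     phrase = ""
--     count = 0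
--     for r in regions:
--         if count == 3:
--             break
--         name = r.replace("_", " ").title()
--         if count == 0:
--             phrase = name
--         elif count == 1:
--             phrase = phrase + " and " + name
--         else:
--             # a title-cased name can never contain lowercase " and ",
--             # so the only occurrence is the separator inserted above
--             phrase = phrase.replace(" and ", ", ") + ", and " + name
--         count += 1
--     return phrase
-- ===== Notes on version B (the rewrite author's own statement) =====
-- stated objective: alternative
-- what changed: Replaces A's build-list-then-branch-on-length with a single online pass holding one accumulator phrase: each new name is appended with ' and ', and when a third item arrives the previous separator is repaired in place via phrase.replace(' and ', ', ') (safe because title-cased names cannot contain lowercase ' and '); no slicing, no intermediate list, no length branches.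
import Mathlib
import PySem

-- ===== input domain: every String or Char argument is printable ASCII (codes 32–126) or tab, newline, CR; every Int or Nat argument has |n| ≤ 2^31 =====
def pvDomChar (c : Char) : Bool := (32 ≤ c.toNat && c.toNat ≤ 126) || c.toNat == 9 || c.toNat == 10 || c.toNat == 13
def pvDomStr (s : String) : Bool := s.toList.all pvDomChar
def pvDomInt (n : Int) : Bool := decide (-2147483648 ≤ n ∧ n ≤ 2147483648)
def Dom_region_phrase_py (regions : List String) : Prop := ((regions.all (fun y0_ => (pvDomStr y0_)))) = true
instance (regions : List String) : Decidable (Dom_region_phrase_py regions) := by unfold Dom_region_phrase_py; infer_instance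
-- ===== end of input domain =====

-- B replaces A's build-list-then-branch-on-length with a single online pass whose
-- accumulator is repaired (replace " and " -> ", ") when a third item arrives (objective: alternative).

-- ===== PORT A =====
-- hand port of Python str.title(): exact on ASCII (cased = ASCII letters there);
-- a letter following a non-letter is uppercased, other letters lowercased.
def pyTitleGo : Bool → List Char → List Char
  | _, [] => []
  | prev, c :: cs =>
    (if PySem.Chars.isalpha c then
       (if prev then PySem.Chars.lowerChar c else PySem.Chars.upperChar c)
     else c) :: pyTitleGo (PySem.Chars.isalpha c) cs

def pyTitle (s : String) : String := String.ofList (pyTitleGo false s.toList)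

def pvDisp (r : String) : String := pyTitle (PySem.Str.replace r "_" " ")

def region_phrase_py (regions : List String) : String :=
  if regions = [] then ""
  else
    let display := (PySem.List.slice regions none (some 3)).map pvDisp
    if display.length = 1 then PySem.List.pyGetD display 0 ""
    else if display.length = 2 then
      PySem.List.pyGetD display 0 "" ++ " and " ++ PySem.List.pyGetD display 1 ""
    else
      PySem.List.pyGetD display 0 "" ++ ", " ++ PySem.List.pyGetD display 1 ""
        ++ ", and " ++ PySem.List.pyGetD display 2 ""

-- ===== PORT B =====
-- B: one pass, one accumulator; the third item repairs the earlier separator in place.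
def pvGoB : List String → String → Nat → String
  | [], phrase, _ => phrase
  | r :: rs, phrase, count =>
    if count = 3 then phrase
    else
      let name := pvDisp r
      let phrase' :=
        if count = 0 then name
        else if count = 1 then phrase ++ " and " ++ name
        else PySem.Str.replace phrase " and " ", " ++ ", and " ++ name
      pvGoB rs phrase' (count + 1)

def region_phrase_py_alt (regions : List String) : String := pvGoB regions "" 0

-- ===== PRECONDITION & SPEC =====
def Spec_region_phrase_py (regions : List String) (out : String) : Prop := out = region_phrase_py_alt regions
instance (regions : List String) (out : String) : Decidable (Spec_region_phrase_py regions out) := by unfold Spec_region_phrase_py; infer_instance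

-- ===== CLAIM (what is proved, stated in full; the proofs are below) =====
def Claim_equal_region_phrase_py : Prop := ∀ (regions : List String), Dom_region_phrase_py regions → Spec_region_phrase_py regions (region_phrase_py regions)

-- ===== LEMMAS AND PROOFS =====

-- no (' ', 'a') adjacent pair: holds for every title-cased list of chars
def pvOkSA : List Char → Bool
  | c :: d :: t => !(c = ' ' && d = 'a') && pvOkSA (d :: t)
  | _ => true

def pvAndSep : List Char := [' ', 'a', 'n', 'd', ' ']

theorem pvNotPrefix {l : List Char} (h : pvOkSA l = true) : pvAndSep.isPrefixOf l = false := by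
  match l with
  | [] => rfl
  | [c] => simp [pvAndSep, List.isPrefixOf]
  | c :: d :: t =>
    simp [pvOkSA] at h
    simp [pvAndSep, List.isPrefixOf]
    intro hc hd
    rcases h.1 with h1 | h1
    · exact absurd hc.symm h1
    · exact absurd hd.symm h1

theorem pvNotPrefix2 {c : Char} {xs r : List Char} (h : pvOkSA (c :: xs) = true) :
    pvAndSep.isPrefixOf (c :: (xs ++ (' ' :: r))) = false := by
  match xs with
  | [] => simp [pvAndSep, List.isPrefixOf]
  | d :: t =>
    simp [pvOkSA] at h
    simp [pvAndSep, List.isPrefixOf]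
    intro hc hd
    rcases h.1 with h1 | h1
    · exact absurd hc.symm h1
    · exact absurd hd.symm h1

theorem pvOkSA_tail {c : Char} {l : List Char} (h : pvOkSA (c :: l) = true) : pvOkSA l = true := by
  cases l with
  | nil => rfl
  | cons d t => simp [pvOkSA] at h ⊢; exact h.2

theorem pvGo_clean (nw : List Char) : ∀ (l : List Char) (fuel : Nat) (acc : List Char),
    pvOkSA l = true → l.length ≤ fuel →
    PySem.Chars.replace.go pvAndSep nw fuel l acc = acc.reverse ++ l := by
  intro l
  induction l with
  | nil =>
    intro fuel acc _ _
    cases fuel <;> simp [PySem.Chars.replace.go]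
  | cons c t ih =>
    intro fuel acc h hf
    cases fuel with
    | zero => simp at hf
    | succ f =>
      rw [PySem.Chars.replace.go]
      rw [pvNotPrefix h]
      simp only [Bool.false_eq_true, if_false]
      rw [ih f (c :: acc) (pvOkSA_tail h) (by simpa using hf)]
      simp

theorem pvGo_main (nw : List Char) (ys : List Char) (hy : pvOkSA ys = true) :
    ∀ (xs : List Char) (fuel : Nat) (acc : List Char),
    pvOkSA xs = true → (xs ++ pvAndSep ++ ys).length ≤ fuel →
    PySem.Chars.replace.go pvAndSep nw fuel (xs ++ pvAndSep ++ ys) acc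
      = acc.reverse ++ xs ++ nw ++ ys := by
  intro xs
  induction xs with
  | nil =>
    intro fuel acc _ hf
    simp [pvAndSep] at hf
    cases fuel with
    | zero => omega
    | succ f =>
      have hshape : ([] : List Char) ++ pvAndSep ++ ys = ' ' :: ('a' :: 'n' :: 'd' :: ' ' :: ys) := by
        simp [pvAndSep]
      rw [hshape, PySem.Chars.replace.go]
      have hp : pvAndSep.isPrefixOf (' ' :: ('a' :: 'n' :: 'd' :: ' ' :: ys)) = true := by
        simp [pvAndSep, List.isPrefixOf]
      rw [hp]
      simp only [if_true]
      have hd : List.drop pvAndSep.length (' ' :: ('a' :: 'n' :: 'd' :: ' ' :: ys)) = ys := by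
        simp [pvAndSep]
      rw [hd, pvGo_clean nw ys f (nw.reverse ++ acc) hy (by omega)]
      simp
  | cons c xs' ih =>
    intro fuel acc h hf
    cases fuel with
    | zero => simp [pvAndSep] at hf
    | succ f =>
      have hshape : (c :: xs') ++ pvAndSep ++ ys = c :: (xs' ++ (' ' :: (['a','n','d',' '] ++ ys))) := by
      
        simp [pvAndSep]
      rw [hshape, PySem.Chars.replace.go, pvNotPrefix2 h]
      simp only [Bool.false_eq_true, if_false]
      have hback : xs' ++ (' ' :: (['a','n','d',' '] ++ ys)) = xs' ++ pvAndSep ++ ys := by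
        simp [pvAndSep]
      rw [hback, ih f (c :: acc) (pvOkSA_tail h) (by simp [pvAndSep] at *; omega)]
      simp

theorem pvReplace_and {x y : List Char} (hx : pvOkSA x = true) (hy : pvOkSA y = true) :
    PySem.Chars.replace (x ++ pvAndSep ++ y) pvAndSep [',', ' '] = x ++ [',', ' '] ++ y := by
  rw [PySem.Chars.replace.eq_def]
  simp only [pvAndSep, List.isEmpty_cons, Bool.false_eq_true, if_false]
  rw [show ([' ','a','n','d',' '] : List Char) = pvAndSep from rfl]
  rw [pvGo_main [',', ' '] y hy x _ [] hx (by simp)]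
  simp

theorem pvUpper_ne_a (c : Char) (h : PySem.Chars.isalpha c = true) :
    PySem.Chars.upperChar c ≠ 'a' := by
  simp [PySem.Chars.isalpha, PySem.Chars.islower, PySem.Chars.isupper, Char.le_def,
    UInt32.le_iff_toNat_le] at h
  simp [PySem.Chars.upperChar, PySem.Chars.islower, Char.le_def, UInt32.le_iff_toNat_le]
  intro hc
  split_ifs at hc with hl
  · have h2 := congrArg Char.toNat hc
    rw [Char.toNat_ofNat] at h2
    have hv : (c.toNat - 32).isValidChar := by
      show c.toNat - 32 < 0xD800 ∨ (0xE000 ≤ c.toNat - 32 ∧ c.toNat - 32 < 0x110000)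
      left
      show c.toNat - 32 < 55296
      have : c.val.toNat = c.toNat := rfl
      omega
    rw [if_pos hv] at h2
    have : c.val.toNat = c.toNat := rfl
    have : ('a' : Char).toNat = 97 := by decide
    omega
  · subst hc
    simp at h hl

theorem pvAlpha_ne_space (b : Bool) (c : Char) (h : PySem.Chars.isalpha c = true) :
    (if b then PySem.Chars.lowerChar c else PySem.Chars.upperChar c) ≠ ' ' := by
  simp [PySem.Chars.isalpha, PySem.Chars.islower, PySem.Chars.isupper, Char.le_def,
    UInt32.le_iff_toNat_le] at h
  have he : c.val.toNat = c.toNat := rfl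
  simp [PySem.Chars.lowerChar, PySem.Chars.upperChar, PySem.Chars.islower, PySem.Chars.isupper,
    Char.le_def, UInt32.le_iff_toNat_le]
  cases b <;> simp
  · intro hc
    split_ifs at hc with hl
    · have h2 := congrArg Char.toNat hc
      rw [Char.toNat_ofNat] at h2
      have hv : (c.toNat - 32).isValidChar := by
        show c.toNat - 32 < 0xD800 ∨ (0xE000 ≤ c.toNat - 32 ∧ c.toNat - 32 < 0x110000)
        left; show c.toNat - 32 < 55296
        omega
      rw [if_pos hv] at h2
      have : (' ' : Char).toNat = 32 := by decide
      omega
    · subst hc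
      simp at h hl
  · intro hc
    split_ifs at hc with hl
    · have h2 := congrArg Char.toNat hc
      rw [Char.toNat_ofNat] at h2
      have hv : (c.toNat + 32).isValidChar := by
        show c.toNat + 32 < 0xD800 ∨ (0xE000 ≤ c.toNat + 32 ∧ c.toNat + 32 < 0x110000)
        left; show c.toNat + 32 < 55296
        omega
      rw [if_pos hv] at h2
      have : (' ' : Char).toNat = 32 := by decide
      omega
    · subst hc
      simp at h hl

theorem pvTitle_ok (l : List Char) : ∀ b, pvOkSA (pyTitleGo b l) = true := by
  induction l with
  | nil => intro b; rfl
  | cons c cs ih =>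
    intro b
    cases cs with
    | nil => simp [pyTitleGo, pvOkSA]
    | cons e cs' =>
      rw [pyTitleGo, pyTitleGo]
      rw [show pvOkSA (((if PySem.Chars.isalpha c then
             (if b then PySem.Chars.lowerChar c else PySem.Chars.upperChar c) else c)) ::
           ((if PySem.Chars.isalpha e then
             (if PySem.Chars.isalpha c then PySem.Chars.lowerChar e else PySem.Chars.upperChar e) else e)) ::
           pyTitleGo (PySem.Chars.isalpha e) cs') =
          (!((if PySem.Chars.isalpha c then
             (if b then PySem.Chars.lowerChar c else PySem.Chars.upperChar c) else c) = ' ' &&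
             (if PySem.Chars.isalpha e then
             (if PySem.Chars.isalpha c then PySem.Chars.lowerChar e else PySem.Chars.upperChar e) else e) = 'a') &&
           pvOkSA (((if PySem.Chars.isalpha e then
             (if PySem.Chars.isalpha c then PySem.Chars.lowerChar e else PySem.Chars.upperChar e) else e)) ::
           pyTitleGo (PySem.Chars.isalpha e) cs')) from rfl]
      have h2 : pvOkSA (((if PySem.Chars.isalpha e then
             (if PySem.Chars.isalpha c then PySem.Chars.lowerChar e else PySem.Chars.upperChar e) else e)) ::
           pyTitleGo (PySem.Chars.isalpha e) cs') = true := by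
        have := ih (PySem.Chars.isalpha c)
        rwa [pyTitleGo] at this
      rw [h2]
      simp only [Bool.and_true]
      by_cases hca : PySem.Chars.isalpha c = true
      · simp only [hca, if_true]
        have := pvAlpha_ne_space b c hca
        simp [this]
      · simp only [Bool.not_eq_true] at hca
        simp only [hca, Bool.false_eq_true, if_false]
        by_cases hea : PySem.Chars.isalpha e = true
        · simp only [hea, if_true]
          have := pvUpper_ne_a e hea
          simp [this]
        · simp only [Bool.not_eq_true] at hea
          simp only [hea, Bool.false_eq_true, if_false]
          by_cases hce : c = ' '
          · by_cases hee : e = 'a'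
            · subst hee; exact absurd hea (by decide)
            · simp [hee]
          · simp [hce]

theorem pvDisp_ok (r : String) : pvOkSA (pvDisp r).toList = true := by
  simp [pvDisp, pyTitle]
  exact pvTitle_ok _ false

theorem pvStrReplace_and (x y : String)
    (hx : pvOkSA x.toList = true) (hy : pvOkSA y.toList = true) :
    PySem.Str.replace (x ++ " and " ++ y) " and " ", " = x ++ ", " ++ y := by
  unfold PySem.Str.replace
  have h1 : (x ++ " and " ++ y).toList = x.toList ++ pvAndSep ++ y.toList := by
    simp [pvAndSep, String.toList_append]
  have h2 : (" and " : String).toList = pvAndSep := by simp [pvAndSep]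
  have h3 : (", " : String).toList = [',', ' '] := by simp
  rw [h1, h2, h3, pvReplace_and hx hy]
  have h4 : x.toList ++ [',', ' '] ++ y.toList = (x ++ ", " ++ y).toList := by
    simp [String.toList_append]
  rw [h4, String.ofList_toList]

-- ===== VERDICT (by name: the statement is the Claim_ definition above) =====
theorem region_phrase_py_spec : Claim_equal_region_phrase_py := by
  intro regions _
  unfold Spec_region_phrase_py region_phrase_py region_phrase_py_alt
  match regions with
  | [] => rfl
  | [a] => simp [pvGoB, PySem.List.slice, PySem.List.pyGetD, PySem.List.pyGet?, PySem.List.pyIdx?]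
  | [a, b] => simp [pvGoB, PySem.List.slice, PySem.List.pyGetD, PySem.List.pyGet?, PySem.List.pyIdx?]
  | a :: b :: c :: rest =>
    have hr := pvStrReplace_and (pvDisp a) (pvDisp b) (pvDisp_ok a) (pvDisp_ok b)
    cases rest with
    | nil =>
      simp [pvGoB, PySem.List.slice, PySem.List.pyGetD, PySem.List.pyGet?, PySem.List.pyIdx?, hr]
    | cons d ds =>
      simp [pvGoB, PySem.List.slice, PySem.List.pyGetD, PySem.List.pyGet?, PySem.List.pyIdx?, hr]
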